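-- pv_equiv track=rewrite | github.com/nightingal3/midtraining | util_scripts/fetch_ablation_results.py | sort_mixture_weights
-- ===== SOURCE A (Python) =====
-- def sort_mixture_weights(weights):
--     """Sort mixture weight percentages numerically."""
--     weight_tuples = []
--     other_weights = []
--
--     for weight in weights:
--         if weight.endswith("_percent"):
--             try:
--                 percent_num = int(weight.split("_")[0])
--                 weight_tuples.append((percent_num, weight))
--             except (IndexError, ValueError):
--                 other_weights.append(weight)
--         else:
--             other_weights.append(weight)
--
--     weight_tuples.sort(key=lambda x: x[0])
--     other_weights.sort()
--
--     return [weight for _, weight in weight_tuples] + other_weights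
-- ===== SOURCE B (Python) =====
-- def sort_mixture_weights(weights):
--     """Sort mixture weight percentages numerically."""
--     def keyfn(w):
--         if w.endswith("_percent"):
--             try:
--                 return (0, int(w.split("_")[0]))
--             except (IndexError, ValueError):
--                 pass
--         return (1, w)
--     return sorted(weights, key=keyfn)
-- ===== Notes on version B (the rewrite author's own statement) =====
-- stated objective: idiomatic
-- what changed: Replaces A's two-bucket partition with two separate sort passes and a concatenation by a single stable sorted() call over the whole list with a composite (group, value) key.
import Mathlib
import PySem

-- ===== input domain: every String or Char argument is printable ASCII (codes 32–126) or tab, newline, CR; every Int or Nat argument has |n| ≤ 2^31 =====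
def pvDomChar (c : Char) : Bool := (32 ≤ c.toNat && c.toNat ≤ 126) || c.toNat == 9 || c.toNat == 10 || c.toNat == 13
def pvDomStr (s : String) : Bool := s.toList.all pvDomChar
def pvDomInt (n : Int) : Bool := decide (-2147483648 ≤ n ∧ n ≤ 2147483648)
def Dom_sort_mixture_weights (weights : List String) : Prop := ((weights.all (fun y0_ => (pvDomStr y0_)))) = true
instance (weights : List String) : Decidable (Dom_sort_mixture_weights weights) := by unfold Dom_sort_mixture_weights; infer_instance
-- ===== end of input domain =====

-- B replaces A's two-bucket partition + two sorts + concatenation by one stable sorted() with a composite (group, value) key (idiomatic; same result).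

-- ===== PORT A =====
-- shared parsing step, int(weight.split("_")[0]): none exactly where Python raises IndexError/ValueError
def pvPercentNum? (w : String) : Option Int :=
  match PySem.Str.split? w "_" with
  | none => none
  | some parts =>
    match PySem.List.pyGet? parts 0 with
    | none => none
    | some p => PySem.Int.ofStr? p

def sort_mixture_weights (weights : List String) : List String :=
  let st := weights.foldl (fun (acc : List (Int × String) × List String) weight =>
    if PySem.Str.endswith weight "_percent" then
      match pvPercentNum? weight with
      | some n => (acc.1 ++ [(n, weight)], acc.2)
      | none => (acc.1, acc.2 ++ [weight])
    else (acc.1, acc.2 ++ [weight])) ([], [])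
  -- other_weights.sort(): Python's string order is code-point lexicographic = List.lt on toList (exact)
  (PySem.List.sorted st.1 (fun x => x.1) false).map (fun t => t.2)
    ++ PySem.List.sorted st.2 (fun w => w.toList) false

-- ===== PORT B =====
-- B's tuple key (0, n) / (1, w) rendered as the lexicographic sum: inl n < inr w always, payloads compared within a group
def pvKeyB (w : String) : Lex (Int ⊕ List Char) :=
  match (if PySem.Str.endswith w "_percent" then pvPercentNum? w else none) with
  | some n => toLex (Sum.inl n)
  | none => toLex (Sum.inr w.toList)

def sort_mixture_weights_alt (weights : List String) : List String :=
  PySem.List.sorted weights pvKeyB false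

-- ===== PRECONDITION & SPEC =====
def Spec_sort_mixture_weights (weights : List String) (out : List String) : Prop := out = sort_mixture_weights_alt weights
instance (weights : List String) (out : List String) : Decidable (Spec_sort_mixture_weights weights out) := by unfold Spec_sort_mixture_weights; infer_instance

-- ===== CLAIM (what is proved, stated in full; the proofs are below) =====
def Claim_equal_sort_mixture_weights : Prop := ∀ (weights : List String), Dom_sort_mixture_weights weights → Spec_sort_mixture_weights weights (sort_mixture_weights weights)

-- ===== LEMMAS AND PROOFS =====

-- the class test and numeric key shared by the reasoning
def pvC (w : String) : Bool := PySem.Str.endswith w "_percent" && (pvPercentNum? w).isSome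
def pvNum (w : String) : Int := (pvPercentNum? w).getD 0

theorem pvKeyB_eq (w : String) :
    pvKeyB w = if pvC w then toLex (Sum.inl (pvNum w)) else toLex (Sum.inr w.toList) := by
  unfold pvKeyB pvC pvNum
  cases h1 : PySem.Str.endswith w "_percent" <;> cases h2 : pvPercentNum? w <;> simp

-- A's accumulation loop computes (map over the percent filter, the other filter)
theorem pvFoldA (ws : List String) (p : List (Int × String)) (o : List String) :
    ws.foldl (fun (acc : List (Int × String) × List String) weight =>
      if PySem.Str.endswith weight "_percent" then
        match pvPercentNum? weight with
        | some n => (acc.1 ++ [(n, weight)], acc.2)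
        | none => (acc.1, acc.2 ++ [weight])
      else (acc.1, acc.2 ++ [weight])) (p, o)
    = (p ++ (ws.filter pvC).map (fun w => (pvNum w, w)), o ++ ws.filter (fun w => !pvC w)) := by
  induction ws generalizing p o with
  | nil => simp
  | cons w t ih =>
    cases h1 : PySem.Str.endswith w "_percent" <;> cases h2 : pvPercentNum? w <;>
      [skip; skip; skip; skip] <;>
    · have hc : pvC w = (PySem.Str.endswith w "_percent" && (pvPercentNum? w).isSome) := rfl
      simp only [List.foldl_cons, h1, h2, hc, Bool.and_true, Bool.and_false,
        Option.isSome_some, Option.isSome_none, if_true, if_false, Bool.false_eq_true,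
        List.filter_cons, Bool.not_true, Bool.not_false]
      first
        | simpa [pvNum, h2] using ih (p ++ [((pvPercentNum? w).getD 0, w)]) o
        | simpa using ih p (o ++ [w])

theorem pvInsertBy_append_of_before {α : Type} (before : α → α → Bool) (x : α)
    (P O : List α) (h : ∀ y ∈ O, before x y = true) :
    PySem.List.insertBy before x (P ++ O) = PySem.List.insertBy before x P ++ O := by
  induction P with
  | nil =>
    cases O with
    | nil => rfl
    | cons o t => simp [PySem.List.insertBy, h o (by simp)]
  | cons p t ih =>
    by_cases hp : before x p = true <;> simp [PySem.List.insertBy, hp, ih]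

theorem pvInsertBy_append_of_not_before {α : Type} (before : α → α → Bool) (x : α)
    (P O : List α) (h : ∀ y ∈ P, before x y = false) :
    PySem.List.insertBy before x (P ++ O) = P ++ PySem.List.insertBy before x O := by
  induction P with
  | nil => rfl
  | cons p t ih =>
    simp [PySem.List.insertBy, h p (by simp)]
    exact ih (fun y hy => h y (by simp [hy]))

theorem pvInsertBy_congr {α : Type} (b1 b2 : α → α → Bool) (x : α) (ys : List α)
    (h : ∀ y ∈ ys, b1 x y = b2 x y) :
    PySem.List.insertBy b1 x ys = PySem.List.insertBy b2 x ys := by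
  induction ys with
  | nil => rfl
  | cons y t ih =>
    have hy := h y (by simp)
    by_cases hb : b1 x y = true <;>
      simp [PySem.List.insertBy, hb, hy ▸ hb, ih (fun z hz => h z (by simp [hz]))]

theorem pvInsertBy_map {α β : Type} (b : β → β → Bool) (g : α → β) (x : α) (l : List α) :
    PySem.List.insertBy b (g x) (l.map g)
      = (PySem.List.insertBy (fun u v => b (g u) (g v)) x l).map g := by
  induction l with
  | nil => rfl
  | cons y t ih =>
    by_cases hb : b (g x) (g y) = true <;> simp [PySem.List.insertBy, hb, ih]

-- the stable insertion fold splits along a two-class key (class-0 always strictly before class-1)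
theorem pvFoldl_insertBy_split {α : Type} (before : α → α → Bool) (c : α → Bool)
    (hcls : ∀ x y, c x = true → c y = false → before x y = true ∧ before y x = false)
    (xs : List α) : ∀ (P O : List α), (∀ y ∈ P, c y = true) → (∀ y ∈ O, c y = false) →
    xs.foldl (fun acc x => PySem.List.insertBy before x acc) (P ++ O)
      = (xs.filter c).foldl (fun acc x => PySem.List.insertBy before x acc) P
        ++ (xs.filter (fun y => !c y)).foldl (fun acc x => PySem.List.insertBy before x acc) O := by
  induction xs with
  | nil => intro P O _ _; simp
  | cons x t ih =>
    intro P O hP hO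
    by_cases hx : c x = true
    · have hstep : PySem.List.insertBy before x (P ++ O)
          = PySem.List.insertBy before x P ++ O :=
        pvInsertBy_append_of_before before x P O
          (fun y hy => (hcls x y hx (hO y hy)).1)
      have hP' : ∀ y ∈ PySem.List.insertBy before x P, c y = true := by
        intro y hy
        rcases (PySem.List.mem_insertBy _ _ _ _).1 hy with h | h
        · exact h ▸ hx
        · exact hP y h
      simp only [List.foldl_cons, hstep, List.filter_cons, hx]
      simpa using ih (PySem.List.insertBy before x P) O hP' hO
    · have hx' : c x = false := by simpa using hx
      have hstep : PySem.List.insertBy before x (P ++ O)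
          = P ++ PySem.List.insertBy before x O :=
        pvInsertBy_append_of_not_before before x P O
          (fun y hy => (hcls y x (hP y hy) hx').2)
      have hO' : ∀ y ∈ PySem.List.insertBy before x O, c y = false := by
        intro y hy
        rcases (PySem.List.mem_insertBy _ _ _ _).1 hy with h | h
        · exact h ▸ hx'
        · exact hO y h
      simp only [List.foldl_cons, hstep, List.filter_cons, hx']
      simpa [hx'] using ih P (PySem.List.insertBy before x O) hP hO'

theorem pvFoldl_insertBy_map {α β : Type} (b : β → β → Bool) (g : α → β) (l : List α) :
    ∀ acc : List α, (l.map g).foldl (fun a y => PySem.List.insertBy b y a) (acc.map g)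
      = (l.foldl (fun a x => PySem.List.insertBy (fun u v => b (g u) (g v)) x a) acc).map g := by
  induction l with
  | nil => intro acc; rfl
  | cons x t ih =>
    intro acc
    simp only [List.map_cons, List.foldl_cons, pvInsertBy_map]
    exact ih _

theorem pvFoldl_insertBy_congr {α : Type} (b1 b2 : α → α → Bool) (l : List α) :
    ∀ acc : List α, (∀ a, (a ∈ l ∨ a ∈ acc) → ∀ c, (c ∈ l ∨ c ∈ acc) → b1 a c = b2 a c) →
    l.foldl (fun a x => PySem.List.insertBy b1 x a) acc
      = l.foldl (fun a x => PySem.List.insertBy b2 x a) acc := by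
  induction l with
  | nil => intro acc _; rfl
  | cons x t ih =>
    intro acc h
    have hins : PySem.List.insertBy b1 x acc = PySem.List.insertBy b2 x acc :=
      pvInsertBy_congr b1 b2 x acc
        (fun y hy => h x (Or.inl (by simp)) y (Or.inr hy))
    simp only [List.foldl_cons, hins]
    refine ih _ ?_
    have hconv : ∀ z, (z ∈ t ∨ z ∈ PySem.List.insertBy b2 x acc) → (z ∈ x :: t ∨ z ∈ acc) := by
      intro z hz
      rcases hz with hz | hz
      · exact Or.inl (List.mem_cons_of_mem _ hz)
      · rcases (PySem.List.mem_insertBy _ _ _ _).1 hz with h' | h'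
        · exact Or.inl (by simp [h'])
        · exact Or.inr h'
    exact fun a ha c hc => h a (hconv a ha) c (hconv c hc)

-- key comparison facts
theorem pvKeyB_lt_of_classes (a b : String) :
    (pvC a = true → pvC b = true → (decide (pvKeyB a < pvKeyB b) = decide (pvNum a < pvNum b)))
    ∧ (pvC a = false → pvC b = false → (decide (pvKeyB a < pvKeyB b) = decide (a.toList < b.toList))) := by
  constructor
  · intro ha hb
    simp [pvKeyB_eq, ha, hb]
  · intro ha hb
    simp [pvKeyB_eq, ha, hb]

-- ===== VERDICT (by name: the statement is the Claim_ definition above) =====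
theorem sort_mixture_weights_spec : Claim_equal_sort_mixture_weights := by
  intro weights _
  unfold Spec_sort_mixture_weights sort_mixture_weights sort_mixture_weights_alt
  simp only [pvFoldA]
  set F := weights.filter pvC with hF
  set G := weights.filter (fun w => !pvC w) with hG
  have hFmem : ∀ w ∈ F, pvC w = true := by intro w hw; exact (List.mem_filter.1 hw).2
  have hGmem : ∀ w ∈ G, pvC w = false := by
    intro w hw; simpa using (List.mem_filter.1 hw).2
  -- B splits into the two classes
  have hsplit :
      PySem.List.sorted weights pvKeyB false
        = F.foldl (fun acc x => PySem.List.insertBy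
            (fun a b => decide (pvKeyB a < pvKeyB b)) x acc) []
          ++ G.foldl (fun acc x => PySem.List.insertBy
            (fun a b => decide (pvKeyB a < pvKeyB b)) x acc) [] := by
    rw [PySem.List.sorted_eq_foldl_insertBy]
    have := pvFoldl_insertBy_split (fun a b => decide (pvKeyB a < pvKeyB b)) pvC
      (by
        intro x y hx hy
        constructor <;> simp [pvKeyB_eq, hx, hy])
      weights [] [] (by simp) (by simp)
    simpa using this
  -- on the percent class the key compares as pvNum
  have hFpart :
      F.foldl (fun acc x => PySem.List.insertBy
          (fun a b => decide (pvKeyB a < pvKeyB b)) x acc) []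
        = PySem.List.sorted F (fun w => pvNum w) false := by
    rw [PySem.List.sorted_eq_foldl_insertBy]
    refine pvFoldl_insertBy_congr _ _ F [] ?_
    intro a ha c hc
    exact (pvKeyB_lt_of_classes a c).1 (hFmem a (by simpa using ha)) (hFmem c (by simpa using hc))
  -- on the other class the key compares as toList
  have hGpart :
      G.foldl (fun acc x => PySem.List.insertBy
          (fun a b => decide (pvKeyB a < pvKeyB b)) x acc) []
        = PySem.List.sorted G (fun w => w.toList) false := by
    rw [PySem.List.sorted_eq_foldl_insertBy]
    refine pvFoldl_insertBy_congr _ _ G [] ?_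
    intro a ha c hc
    exact (pvKeyB_lt_of_classes a c).2 (hGmem a (by simpa using ha)) (hGmem c (by simpa using hc))
  -- A's tuple sort is the pvNum sort of F, mapped through the pairing
  have hA1 :
      (PySem.List.sorted (F.map (fun w => (pvNum w, w))) (fun x => x.1) false).map (fun t => t.2)
        = PySem.List.sorted F (fun w => pvNum w) false := by
    rw [PySem.List.sorted_eq_foldl_insertBy, PySem.List.sorted_eq_foldl_insertBy]
    have := pvFoldl_insertBy_map (fun a b : Int × String => decide (a.1 < b.1))
      (fun w => (pvNum w, w)) F ([] : List String)
    simp only [List.map_nil] at this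
    rw [this, List.map_map]
    have : ((fun t : Int × String => t.2) ∘ fun w => (pvNum w, w)) = id := rfl
    simp [this]
  rw [hsplit, hFpart, hGpart, ← hA1]
  simp
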